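-- pv_equiv track=rewrite | github.com/PenguinLJ/Pythondaily | 202401/1.13timoattack.py | total_poison_duration
-- ===== SOURCE A (Python) =====
-- def total_poison_duration(timeSeries, duration):
--     if not timeSeries:  # 特殊情况处理： 如果timeSeries为空，说明没有攻击，直接返回中毒总时间为0。
--         return 0
--
--     total_duration = 0  # 初始化中毒总时间： 使用total_duration变量来记录中毒的总时间。
--
--     for i in range(1, len(timeSeries)):  # 遍历攻击时间点数组： 使用for循环遍历timeSeries数组。
--         gap = timeSeries[i] - timeSeries[i - 1]  # 计算攻击时间间隔： 计算当前攻击和前一次攻击之间的时间间隔。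
--         total_duration += min(gap, duration)  # 累加中毒时间： 将当前时间间隔与duration中取较小值，表示本次攻击的中毒时间，将其累加到总中毒时间上。
--
--     return total_duration + duration  # 最后一个攻击的中毒时间
-- ===== SOURCE B (Python) =====
-- def total_poison_duration(timeSeries, duration):
--     # Divide and conquer: poisoned(seg) is the capped-gap sum of a segment,
--     # computed by splitting the segment at its midpoint (halves share the
--     # boundary element so every consecutive pair lands in exactly one half).
--     def poisoned(seg):
--         if len(seg) < 2:
--             return 0
--         if len(seg) == 2:
--             return min(seg[1] - seg[0], duration)
--         m = len(seg) // 2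
--         return poisoned(seg[:m + 1]) + poisoned(seg[m:])
--     return poisoned(timeSeries) + duration if timeSeries else 0
-- ===== Notes on version B (the rewrite author's own statement) =====
-- stated objective: alternative
-- what changed: Replaces A's linear indexed scan over consecutive gaps with a divide-and-conquer recursion: the segment is split at its midpoint (halves sharing the boundary element), each half's capped-gap sum is computed recursively, and the trailing duration is added once at the top.
import Mathlib
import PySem

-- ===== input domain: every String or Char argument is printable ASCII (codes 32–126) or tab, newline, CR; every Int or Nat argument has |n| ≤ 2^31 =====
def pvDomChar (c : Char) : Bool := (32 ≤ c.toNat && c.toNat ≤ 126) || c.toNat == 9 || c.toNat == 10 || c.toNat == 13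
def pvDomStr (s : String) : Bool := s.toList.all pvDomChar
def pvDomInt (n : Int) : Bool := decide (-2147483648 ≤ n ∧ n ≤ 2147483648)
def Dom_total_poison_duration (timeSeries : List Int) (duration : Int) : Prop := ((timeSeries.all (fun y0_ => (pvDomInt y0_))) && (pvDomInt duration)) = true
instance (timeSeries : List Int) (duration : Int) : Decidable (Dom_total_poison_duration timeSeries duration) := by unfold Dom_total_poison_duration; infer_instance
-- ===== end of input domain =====

-- B computes the capped-gap sum by divide and conquer (split at the midpoint, halves sharing
-- the boundary element) instead of A's linear indexed scan; an alternative decomposition.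

-- ===== PORT A =====
def total_poison_duration (timeSeries : List Int) (duration : Int) : Int :=
  if timeSeries = [] then 0
  else
    let total_duration :=
      (PySem.List.pyRange 1 (timeSeries.length : Int) 1).foldl
        (fun acc i =>
          let gap := PySem.List.pyGetD timeSeries i 0 - PySem.List.pyGetD timeSeries (i - 1) 0
          acc + min gap duration) 0
    total_duration + duration

-- ===== PORT B =====
-- helper `poisoned` of Source B: len(seg)//2 on a Nat length is Nat division (exact here).
def pvPoisoned (duration : Int) (seg : List Int) : Int :=
  if seg.length < 2 then 0
  else if seg.length = 2 then
    min (PySem.List.pyGetD seg 1 0 - PySem.List.pyGetD seg 0 0) duration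
  else
    let m : Nat := seg.length / 2
    pvPoisoned duration (PySem.List.slice seg none (some ((m : Int) + 1)))
      + pvPoisoned duration (PySem.List.slice seg (some (m : Int)) none)
termination_by seg.length
decreasing_by
  · have : (m : Int) + 1 = ((m + 1 : Nat) : Int) := by push_cast; ring
    rw [this, PySem.List.slice_to_natCast, List.length_take]
    omega
  · rw [PySem.List.slice_from_natCast, List.length_drop]
    omega

def total_poison_duration_alt (timeSeries : List Int) (duration : Int) : Int :=
  if timeSeries = [] then 0 else pvPoisoned duration timeSeries + duration

-- ===== PRECONDITION & SPEC =====
def Spec_total_poison_duration (timeSeries : List Int) (duration : Int) (out : Int) : Prop := out = total_poison_duration_alt timeSeries duration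
instance (timeSeries : List Int) (duration : Int) (out : Int) : Decidable (Spec_total_poison_duration timeSeries duration out) := by unfold Spec_total_poison_duration; infer_instance

-- ===== CLAIM (what is proved, stated in full; the proofs are below) =====
def Claim_equal_total_poison_duration : Prop := ∀ (timeSeries : List Int) (duration : Int), Dom_total_poison_duration timeSeries duration → Spec_total_poison_duration timeSeries duration (total_poison_duration timeSeries duration)

-- ===== LEMMAS AND PROOFS =====

-- Reference value: sum of min(gap, d) over consecutive pairs, as structural recursion.
def pvPairSum (d : Int) : List Int → Int
  | a :: b :: rest => min (b - a) d + pvPairSum d (b :: rest)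
  | _ => 0

theorem pvPairSum_split (d : Int) (y : Int) (ys : List Int) :
    ∀ xs : List Int, pvPairSum d (xs ++ y :: ys) = pvPairSum d (xs ++ [y]) + pvPairSum d (y :: ys) := by
  intro xs
  induction xs with
  | nil => simp [pvPairSum]
  | cons a xs' ih =>
    cases xs' with
    | nil => simp [pvPairSum]
    | cons b t =>
      simp only [List.cons_append, pvPairSum] at ih ⊢
      rw [ih]; ring

theorem pvPoisoned_eq_pairSum (d : Int) : ∀ (n : Nat) (seg : List Int), seg.length ≤ n →
    pvPoisoned d seg = pvPairSum d seg := by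
  intro n
  induction n with
  | zero =>
    intro seg h
    have : seg = [] := by cases seg <;> simp_all
    subst this; simp [pvPoisoned, pvPairSum]
  | succ k ih =>
    intro seg hlen
    rw [pvPoisoned]
    by_cases h2 : seg.length < 2
    · match seg, h2 with
      | [], _ => simp [pvPairSum]
      | [a], _ => simp [pvPairSum]
    · rw [if_neg h2]
      by_cases he : seg.length = 2
      · rw [if_pos he]
        match seg, he with
        | [a, b], _ => simp [pvPairSum, PySem.List.pyGetD]
      · rw [if_neg he]
        have h3 : 3 ≤ seg.length := by omega
        show pvPoisoned d (PySem.List.slice seg none (some (((seg.length / 2 : Nat) : Int) + 1)))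
              + pvPoisoned d (PySem.List.slice seg (some ((seg.length / 2 : Nat) : Int)) none)
            = pvPairSum d seg
        set m : Nat := seg.length / 2 with hm
        have hm1 : 1 ≤ m := by omega
        have hmlt : m + 1 < seg.length := by omega
        have hcast : (m : Int) + 1 = ((m + 1 : Nat) : Int) := by push_cast; ring
        rw [hcast, PySem.List.slice_to_natCast, PySem.List.slice_from_natCast]
        have hmlen : m < seg.length := by omega
        -- decompose seg around position m
        have hdrop : seg.drop m = seg[m] :: seg.drop (m + 1) := (List.getElem_cons_drop hmlen).symm
        have htake : seg.take (m + 1) = seg.take m ++ [seg[m]] := by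
          rw [List.take_add_one, List.getElem?_eq_getElem hmlen]; rfl
        have hseg : seg = seg.take m ++ seg[m] :: seg.drop (m + 1) := by
          conv_lhs => rw [← List.take_append_drop m seg]
          rw [hdrop]
        have hA := ih (seg.take (m + 1)) (by rw [List.length_take]; omega)
        have hB := ih (seg.drop m) (by rw [List.length_drop]; omega)
        rw [hA, hB]
        conv_rhs => rw [hseg]
        rw [pvPairSum_split d seg[m] (seg.drop (m+1)) (seg.take m), ← htake, ← hdrop]

-- getD on a prefix of a snoc list
theorem pvGetD_append_singleton_lt (xs : List Int) (x : Int) (i : Int) (d : Int)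
    (h0 : 0 ≤ i) (h : i < (xs.length : Int)) :
    PySem.List.pyGetD (xs ++ [x]) i d = PySem.List.pyGetD xs i d := by
  have hi : i.toNat < xs.length := by omega
  rw [PySem.List.pyGetD_eq_getElem (xs ++ [x]) d h0 (by simp; omega),
      PySem.List.pyGetD_eq_getElem xs d h0 (by exact_mod_cast h)]
  simp [List.getElem_append_left hi]

-- pairSum of a snoc list
theorem pvPairSum_snoc (d x : Int) : ∀ (ys : List Int) (hy : ys ≠ []),
    pvPairSum d (ys ++ [x]) = pvPairSum d ys + min (x - ys.getLast hy) d := by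
  intro ys
  induction ys with
  | nil => intro h; exact absurd rfl h
  | cons a ys' ih =>
    intro _
    cases ys' with
    | nil => simp [pvPairSum]
    | cons b t =>
      have h' : (b :: t) ≠ [] := by simp
      have hlast : (a :: b :: t).getLast (by simp) = (b :: t).getLast h' :=
        List.getLast_cons h'
      simp only [List.cons_append, pvPairSum, hlast]
      rw [show (b :: t) ++ [x] = b :: (t ++ [x]) from rfl] at ih
      rw [ih h']
      ring

-- A's fold computes pvPairSum (backward induction on the list).
theorem pvFoldA_eq_pairSum (d : Int) (ts : List Int) :
    (PySem.List.pyRange 1 (ts.length : Int) 1).foldl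
      (fun acc i => acc + min (PySem.List.pyGetD ts i 0 - PySem.List.pyGetD ts (i - 1) 0) d) 0
      = pvPairSum d ts := by
  induction ts using List.reverseRecOn with
  | nil => simp [pvPairSum, PySem.List.pyRange_one_eq_nil]
  | append_singleton xs x ih =>
    cases hxs : xs with
    | nil => simp [pvPairSum, PySem.List.pyRange_one_eq_nil]
    | cons a t =>
      rw [← hxs]
      have hne : xs ≠ [] := by rw [hxs]; simp
      have hlen1 : 1 ≤ (xs.length : Int) := by
        have := List.length_pos_iff.mpr hne; omega
      have hlen : ((xs ++ [x]).length : Int) = (xs.length : Int) + 1 := by simp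
      rw [hlen, PySem.List.pyRange_one_succ_right hlen1, List.foldl_append]
      -- the fold over the prefix range sees only indices < xs.length
      have hcongr :
          (PySem.List.pyRange 1 (xs.length : Int) 1).foldl
            (fun acc i => acc + min (PySem.List.pyGetD (xs ++ [x]) i 0 - PySem.List.pyGetD (xs ++ [x]) (i - 1) 0) d) 0
          = (PySem.List.pyRange 1 (xs.length : Int) 1).foldl
            (fun acc i => acc + min (PySem.List.pyGetD xs i 0 - PySem.List.pyGetD xs (i - 1) 0) d) 0 := by
        apply PySem.List.foldl_congr_mem
        intro acc i hi
        have hmem := (PySem.List.mem_pyRange_one).1 hi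
        rw [pvGetD_append_singleton_lt xs x i 0 (by omega) (by omega),
            pvGetD_append_singleton_lt xs x (i - 1) 0 (by omega) (by omega)]
      rw [hcongr, ih]
      -- last step: index xs.length hits x, index xs.length - 1 hits xs.getLast
      simp only [List.foldl_cons, List.foldl_nil]
      have hx : PySem.List.pyGetD (xs ++ [x]) (xs.length : Int) 0 = x := by
        rw [PySem.List.pyGetD_eq_getElem (xs ++ [x]) 0 (by omega)
              (by simp only [List.length_append, List.length_cons, List.length_nil]; push_cast; omega)]
        simp
      have hlast : PySem.List.pyGetD (xs ++ [x]) ((xs.length : Int) - 1) 0 = xs.getLast hne := by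
        have hpos : 0 < xs.length := List.length_pos_iff.mpr hne
        rw [List.getLast_eq_getElem hne,
            PySem.List.pyGetD_eq_getElem (xs ++ [x]) 0 (by omega)
              (by simp only [List.length_append, List.length_cons, List.length_nil]; push_cast; omega)]
        have ht : ((xs.length : Int) - 1).toNat = xs.length - 1 := by omega
        simp only [ht, List.getElem_append]
        simp [Nat.sub_lt hpos]
      rw [hx, hlast, pvPairSum_snoc d x xs hne]

-- ===== VERDICT (by name: the statement is the Claim_ definition above) =====
theorem total_poison_duration_spec : Claim_equal_total_poison_duration := by
  intro ts d _
  unfold Spec_total_poison_duration total_poison_duration total_poison_duration_alt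
  by_cases h : ts = []
  · simp [h]
  · rw [if_neg h, if_neg h, pvFoldA_eq_pairSum, pvPoisoned_eq_pairSum d ts.length ts le_rfl]
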